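-- pv_equiv track=rewrite | github.com/sony-jun/01-ALGORITHM | 2회차/이수진/20220725/2_두개뽑아서더하기.py | solution
-- ===== SOURCE A (Python) =====
-- def solution(numbers):
--     temp = []
--     for i in range(len(numbers)):
--         for j in range(len(numbers)):
--             if numbers[i] != numbers[j] :
--                 temp.append(numbers[i]+numbers[j])
--     answer = set(sorted(temp))
--
--     return answer
-- ===== SOURCE B (Python) =====
-- def solution(numbers):
--     # Sort the distinct values, then peel them off front-to-back, pairing each
--     # peeled value only with the strictly larger values still remaining: every
--     # unordered pair of distinct values is visited exactly once (A visits both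
--     # orders, but u+v = v+u), and distinctness makes any u != v guard needless.
--     rest = sorted(set(numbers))
--     sums = set()
--     while rest:
--         u = rest.pop(0)
--         for v in rest:
--             sums.add(u + v)
--     return set(sorted(sums))
-- ===== Notes on version B (the rewrite author's own statement) =====
-- stated objective: faster
-- what changed: B sorts the distinct values and, peeling the smallest remaining value off each round, pairs it only with the strictly larger remaining values, so each unordered pair of distinct values is summed exactly once with no inequality test, instead of A's full index-by-index double loop with a guard over the raw list followed by sorting the quadratic sum list.
import Mathlib
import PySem

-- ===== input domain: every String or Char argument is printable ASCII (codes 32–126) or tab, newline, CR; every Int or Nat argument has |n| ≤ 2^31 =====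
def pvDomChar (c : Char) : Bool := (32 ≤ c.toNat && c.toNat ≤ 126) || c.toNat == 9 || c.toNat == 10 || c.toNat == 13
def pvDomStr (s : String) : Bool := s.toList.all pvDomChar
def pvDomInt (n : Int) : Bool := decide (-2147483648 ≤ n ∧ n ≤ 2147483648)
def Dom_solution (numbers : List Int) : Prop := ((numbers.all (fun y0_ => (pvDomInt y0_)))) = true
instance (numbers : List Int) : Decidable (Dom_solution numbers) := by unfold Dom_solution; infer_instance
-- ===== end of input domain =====

-- B sorts the distinct values and peels them off front-to-back, pairing each peeled value
-- only with the strictly larger remaining values, so each unordered pair of distinct values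
-- is summed once with no inequality test (A scans all index pairs of the raw list).

-- ===== PORT A =====
def solution (numbers : List Int) : List Int :=
  let temp : List Int :=
    (PySem.List.pyRange 0 (numbers.length : Int) 1).foldl (fun acc i =>
      (PySem.List.pyRange 0 (numbers.length : Int) 1).foldl (fun acc2 j =>
        if PySem.List.pyGetD numbers i 0 ≠ PySem.List.pyGetD numbers j 0 then
          acc2 ++ [PySem.List.pyGetD numbers i 0 + PySem.List.pyGetD numbers j 0]
        else acc2) acc) []
  PySem.Set.ofList (PySem.List.sorted temp (fun x => x) false)

-- ===== PORT B =====
-- the 'while rest: u = rest.pop(0); for v in rest: sums.add(u+v)' loop of Source B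
def triSums : List Int → PySem.Set Int → PySem.Set Int
  | [], sums => sums
  | u :: rest, sums => triSums rest (rest.foldl (fun s v => PySem.Set.add s (u + v)) sums)

def solution_alt (numbers : List Int) : List Int :=
  let rest : List Int := PySem.List.sorted (PySem.Set.ofList numbers) (fun x => x) false
  let sums : PySem.Set Int := triSums rest PySem.Set.empty
  PySem.Set.ofList (PySem.List.sorted sums (fun x => x) false)

-- ===== PRECONDITION & SPEC =====
def Spec_solution (numbers : List Int) (out : List Int) : Prop := out = solution_alt numbers
instance (numbers : List Int) (out : List Int) : Decidable (Spec_solution numbers out) := by unfold Spec_solution; infer_instance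

-- ===== CLAIM (what is proved, stated in full; the proofs are below) =====
def Claim_equal_solution : Prop := ∀ (numbers : List Int), Dom_solution numbers → Spec_solution numbers (solution numbers)

-- ===== LEMMAS AND PROOFS =====

lemma mem_foldl_add_sum (y u : Int) (l : List Int) (s : PySem.Set Int) :
    y ∈ l.foldl (fun s2 v => PySem.Set.add s2 (u + v)) s ↔ y ∈ s ∨ ∃ v ∈ l, y = u + v := by
  simp [PySem.Set.mem_foldl_add]

lemma nodup_foldl_add_sum (u : Int) (l : List Int) (s : PySem.Set Int) (h : s.Nodup) :
    (l.foldl (fun s2 v => PySem.Set.add s2 (u + v)) s).Nodup := by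
  induction l generalizing s with
  | nil => exact h
  | cons a t ih => exact ih _ (PySem.Set.nodup_add _ _ h)

lemma nodup_triSums (l : List Int) (s : PySem.Set Int) (h : s.Nodup) : (triSums l s).Nodup := by
  induction l generalizing s with
  | nil => exact h
  | cons a t ih => exact ih _ (nodup_foldl_add_sum _ _ _ h)

lemma mem_triSums (y : Int) (l : List Int) (s : PySem.Set Int) (hl : l.Pairwise (· < ·)) :
    y ∈ triSums l s ↔ y ∈ s ∨ ∃ u ∈ l, ∃ v ∈ l, u ≠ v ∧ y = u + v := by
  induction l generalizing s with
  | nil => simp [triSums]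
  | cons a t ih =>
    rw [List.pairwise_cons] at hl
    rw [triSums, ih _ hl.2, mem_foldl_add_sum]
    constructor
    · rintro ((h | ⟨v, hv, rfl⟩) | ⟨u, hu, v, hv, hne, rfl⟩)
      · exact .inl h
      · exact .inr ⟨a, by simp, v, by simp [hv], (ne_of_lt (hl.1 v hv)), rfl⟩
      · exact .inr ⟨u, by simp [hu], v, by simp [hv], hne, rfl⟩
    · rintro (h | ⟨u, hu, v, hv, hne, rfl⟩)
      · exact .inl (.inl h)
      · rcases List.mem_cons.1 hu with h1 | h1
        · rcases List.mem_cons.1 hv with h2 | h2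
          · exact absurd (h1.trans h2.symm) hne
          · exact .inl (.inr ⟨v, h2, by rw [h1]⟩)
        · rcases List.mem_cons.1 hv with h2 | h2
          · exact .inl (.inr ⟨u, h1, by rw [h2]; ring⟩)
          · exact .inr ⟨u, h1, v, h2, hne, rfl⟩

lemma ofList_pairwise_lt (xs : List Int) (h : xs.Pairwise (· ≤ ·)) :
    (PySem.Set.ofList xs).Pairwise (· < ·) := by
  induction xs with
  | nil => simp [PySem.Set.ofList]
  | cons a t ih =>
    rw [List.pairwise_cons] at h
    rw [PySem.Set.ofList_cons]
    refine List.pairwise_cons.2 ⟨?_, ?_⟩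
    · intro y hy
      rcases (PySem.Set.mem_discard _ _ _).1 hy with ⟨hmem, hne⟩
      exact lt_of_le_of_ne (h.1 y ((PySem.Set.mem_ofList _ _).1 hmem)) (Ne.symm hne)
    · have hp := ih h.2
      simp only [PySem.Set.discard]
      exact hp.sublist List.filter_sublist

lemma mem_tempA (numbers : List Int) (y : Int) :
    y ∈ numbers.foldl (fun acc u =>
          numbers.foldl (fun acc2 v => if u ≠ v then acc2 ++ [u + v] else acc2) acc) [] ↔
      ∃ u ∈ numbers, ∃ v ∈ numbers, u ≠ v ∧ y = u + v := by
  simp only [PySem.List.foldl_append_ite (fun v => _ ≠ v) (fun v => _ + v),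
    PySem.List.foldl_append_eq_flatMap]
  simp only [List.nil_append, List.mem_flatMap, List.mem_map, List.mem_filter,
    decide_eq_true_eq]
  tauto

lemma tempA_eq (numbers : List Int) :
    (PySem.List.pyRange 0 (numbers.length : Int) 1).foldl (fun acc i =>
      (PySem.List.pyRange 0 (numbers.length : Int) 1).foldl (fun acc2 j =>
        if PySem.List.pyGetD numbers i 0 ≠ PySem.List.pyGetD numbers j 0 then
          acc2 ++ [PySem.List.pyGetD numbers i 0 + PySem.List.pyGetD numbers j 0]
        else acc2) acc) [] =
    numbers.foldl (fun acc u =>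
      numbers.foldl (fun acc2 v => if u ≠ v then acc2 ++ [u + v] else acc2) acc) [] := by
  have hinner : ∀ (u : Int) (acc : List Int),
      (PySem.List.pyRange 0 (numbers.length : Int) 1).foldl (fun acc2 j =>
        if u ≠ PySem.List.pyGetD numbers j 0 then
          acc2 ++ [u + PySem.List.pyGetD numbers j 0] else acc2) acc =
      numbers.foldl (fun acc2 v => if u ≠ v then acc2 ++ [u + v] else acc2) acc :=
    fun u acc => PySem.List.foldl_pyRange_zero_pyGetD' numbers 0
      (fun acc2 v => if u ≠ v then acc2 ++ [u + v] else acc2) acc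
  calc (PySem.List.pyRange 0 (numbers.length : Int) 1).foldl (fun acc i =>
          (PySem.List.pyRange 0 (numbers.length : Int) 1).foldl (fun acc2 j =>
            if PySem.List.pyGetD numbers i 0 ≠ PySem.List.pyGetD numbers j 0 then
              acc2 ++ [PySem.List.pyGetD numbers i 0 + PySem.List.pyGetD numbers j 0]
            else acc2) acc) []
      = (PySem.List.pyRange 0 (numbers.length : Int) 1).foldl (fun acc i =>
          numbers.foldl (fun acc2 v =>
            if PySem.List.pyGetD numbers i 0 ≠ v then
              acc2 ++ [PySem.List.pyGetD numbers i 0 + v] else acc2) acc) [] := by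
        exact PySem.List.foldl_congr_mem _ _ _ _
          (fun acc i _ => hinner (PySem.List.pyGetD numbers i 0) acc)
    _ = numbers.foldl (fun acc u =>
          numbers.foldl (fun acc2 v => if u ≠ v then acc2 ++ [u + v] else acc2) acc) [] :=
        PySem.List.foldl_pyRange_zero_pyGetD' numbers 0
          (fun acc u => numbers.foldl (fun acc2 v =>
            if u ≠ v then acc2 ++ [u + v] else acc2) acc) []

-- ===== VERDICT (by name: the statement is the Claim_ definition above) =====
theorem solution_spec : Claim_equal_solution := by
  intro numbers _
  unfold Spec_solution solution solution_alt
  rw [tempA_eq numbers]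
  set temp : List Int := numbers.foldl (fun acc u =>
      numbers.foldl (fun acc2 v => if u ≠ v then acc2 ++ [u + v] else acc2) acc) [] with htemp
  set vals : List Int := PySem.List.sorted (PySem.Set.ofList numbers) (fun x => x) false with hvals
  set sums : PySem.Set Int := triSums vals PySem.Set.empty with hsums
  have hvlt : vals.Pairwise (· < ·) := PySem.List.sorted_ofList_pairwise_lt numbers
  have hsnodup : sums.Nodup := nodup_triSums _ _ List.nodup_nil
  have hsortnodup : (PySem.List.sorted sums (fun x => x) false).Nodup :=
    (PySem.List.sorted_perm _ _ _).symm.nodup hsnodup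
  rw [PySem.Set.ofList_eq_self_of_nodup _ hsortnodup]
  have hmemS : ∀ y, y ∈ sums ↔ ∃ u ∈ numbers, ∃ v ∈ numbers, u ≠ v ∧ y = u + v := by
    intro y
    rw [hsums, mem_triSums _ _ _ hvlt]
    simp only [PySem.Set.empty, List.not_mem_nil, false_or, hvals,
      PySem.List.mem_sorted, PySem.Set.mem_ofList]
  have hPlt : (PySem.Set.ofList (PySem.List.sorted temp (fun x => x) false)).Pairwise (· < ·) :=
    ofList_pairwise_lt _ (PySem.List.sorted_pairwise _ _)
  have hperm : (PySem.Set.ofList (PySem.List.sorted temp (fun x => x) false)).Perm sums := by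
    refine (List.perm_ext_iff_of_nodup (PySem.Set.nodup_ofList _) hsnodup).2 ?_
    intro y
    rw [PySem.Set.mem_ofList, PySem.List.mem_sorted, hmemS, htemp, mem_tempA]
  exact (PySem.List.sorted_eq_of_perm_of_pairwise_lt _ _ _ hperm hPlt).symm
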